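-- pv_equiv track=rewrite | github.com/smmalmansoori/bub-n-bros | common/pixmap.py | makebkgnd
-- ===== SOURCE A (Python) =====
-- def makebkgnd(w, h, data):
--     scanline = 3*w
--     result = []
--     for position in range(0, scanline*h, scanline):
--         line = []
--         for p in range(position, position+scanline, 3):
--             line.append(2 * (chr(ord(data[p  ]) >> 3) +
--                              chr(ord(data[p+1]) >> 3) +
--                              chr(ord(data[p+2]) >> 3)))
--         line = ''.join(line)
--         result.append(line)
--         result.append(line)
--     return w*2, h*2, ''.join(result)
-- ===== SOURCE B (Python) =====
-- def makebkgnd(w, h, data):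
--     # pass 1: global pixel transform (256-entry table, applied once over the data)
--     table = [chr(i >> 3) for i in range(256)]
--     s = ''.join(table[ord(c)] for c in data)
--     # pass 2: reshape: slice into scanlines, duplicate each 3-byte triple and each line
--     scanline = 3 * w
--     out = []
--     for row in range(h):
--         line = s[row * scanline:(row + 1) * scanline]
--         doubled = ''.join(line[i:i + 3] * 2 for i in range(0, scanline, 3))
--         out.append(doubled)
--         out.append(doubled)
--     return w * 2, h * 2, ''.join(out)
-- ===== Notes on version B (the rewrite author's own statement) =====
-- stated objective: idiomatic
-- what changed: B separates the pixel transform (a 256-entry lookup table applied once over the whole data string) from a distinct reshaping pass that slices the transformed stream into scanlines and duplicates triples and lines by slicing, instead of A's fused per-byte chr(ord(..)>>3) inside nested index loops.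
import Mathlib
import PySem

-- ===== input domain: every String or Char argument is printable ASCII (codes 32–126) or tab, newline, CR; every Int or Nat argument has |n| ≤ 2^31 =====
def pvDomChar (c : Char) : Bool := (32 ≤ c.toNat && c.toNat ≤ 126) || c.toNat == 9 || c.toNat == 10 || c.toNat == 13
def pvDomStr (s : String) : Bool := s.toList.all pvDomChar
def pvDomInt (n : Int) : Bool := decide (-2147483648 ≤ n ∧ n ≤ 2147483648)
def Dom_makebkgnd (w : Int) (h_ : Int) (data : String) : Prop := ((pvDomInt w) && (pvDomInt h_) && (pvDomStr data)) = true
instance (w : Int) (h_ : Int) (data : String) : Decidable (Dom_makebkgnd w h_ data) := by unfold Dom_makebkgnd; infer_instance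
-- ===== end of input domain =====

-- B separates the global pixel transform (one table lookup pass over the data) from a distinct
-- reshaping pass built on slices, instead of A's fused per-byte nested index loops. Return values only.

-- ===== PORT A =====
def makebkgnd (w : Int) (h_ : Int) (data : String) : Int × Int × String :=
  let scanline := 3 * w
  let cs := data.toList
  let result : List (List Char) :=
    (PySem.List.pyRange 0 (scanline * h_) scanline).foldl (fun result position =>
      let line : List (List Char) :=
        (PySem.List.pyRange position (position + scanline) 3).foldl (fun line p =>
          line ++ [PySem.List.pyRepeat
            [Char.ofNat ((PySem.List.pyGetD cs p ' ').toNat >>> 3),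
             Char.ofNat ((PySem.List.pyGetD cs (p + 1) ' ').toNat >>> 3),
             Char.ofNat ((PySem.List.pyGetD cs (p + 2) ' ').toNat >>> 3)] 2]) []
      let lineJ : List Char := PySem.Chars.join [] line
      result ++ [lineJ] ++ [lineJ]) []
  (w * 2, h_ * 2, String.ofList (PySem.Chars.join [] result))

-- ===== PORT B =====
def makebkgnd_alt (w : Int) (h_ : Int) (data : String) : Int × Int × String :=
  let table : List (List Char) := (List.range 256).map (fun i => [Char.ofNat (i >>> 3)])
  let s : List Char :=
    PySem.Chars.join [] (data.toList.map (fun c => PySem.List.pyGetD table (c.toNat : Int) []))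
  let scanline := 3 * w
  let out : List (List Char) :=
    (PySem.List.pyRange 0 h_ 1).foldl (fun out row =>
      let line := PySem.List.slice s (some (row * scanline)) (some ((row + 1) * scanline))
      let doubled := PySem.Chars.join []
        ((PySem.List.pyRange 0 scanline 3).map (fun i =>
          PySem.List.pyRepeat (PySem.List.slice line (some i) (some (i + 3))) 2))
      out ++ [doubled] ++ [doubled]) []
  (w * 2, h_ * 2, String.ofList (PySem.Chars.join [] out))

-- ===== PRECONDITION & SPEC =====
-- Pre_ excludes exactly the inputs where A raises: w = 0 (range() with step 0 is ValueError) and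
-- positive w, h with data shorter than 3*w*h pixels bytes (IndexError).
def Pre_makebkgnd (w : Int) (h_ : Int) (data : String) : Prop :=
  w ≠ 0 ∧ (0 < w → 0 < h_ → 3 * w * h_ ≤ PySem.Str.len data)
instance (w : Int) (h_ : Int) (data : String) : Decidable (Pre_makebkgnd w h_ data) := by
  unfold Pre_makebkgnd; infer_instance
def pvWitness_makebkgnd : Int × Int × String := (1, 1, "abc")

def Spec_makebkgnd (w : Int) (h_ : Int) (data : String) (out : Int × Int × String) : Prop := out = makebkgnd_alt w h_ data
instance (w : Int) (h_ : Int) (data : String) (out : Int × Int × String) : Decidable (Spec_makebkgnd w h_ data out) := by unfold Spec_makebkgnd; infer_instance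

-- ===== CLAIM (what is proved, stated in full; the proofs are below) =====
def Claim_equal_makebkgnd : Prop := ∀ (w : Int) (h_ : Int) (data : String), Dom_makebkgnd w h_ data → Pre_makebkgnd w h_ data → Spec_makebkgnd w h_ data (makebkgnd w h_ data)

-- ===== LEMMAS AND PROOFS =====

theorem pv_flatten_flatMap (l : List Int) (f : Int → List (List Char)) :
    (l.flatMap f).flatten = l.flatMap (fun x => (f x).flatten) := by
  induction l with
  | nil => rfl
  | cons a t ih => simp [List.flatMap_cons, List.flatten_append, ih]

-- the shifted pixel byte
def pvShift (c : Char) : Char := Char.ofNat (c.toNat >>> 3)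
-- one translated triple starting at byte offset p
def pvTrip (s : List Char) (p : Nat) : List Char := [s.getD p ' ', s.getD (p + 1) ' ', s.getD (p + 2) ' ']
-- the common normal form of both outputs' pixel stream (s = translated bytes)
def pvCanon (s : List Char) (W H : Nat) : List Char :=
  (List.range H).flatMap (fun r =>
    ((List.range W).flatMap (fun j => pvTrip s (3 * W * r + 3 * j) ++ pvTrip s (3 * W * r + 3 * j))) ++
    ((List.range W).flatMap (fun j => pvTrip s (3 * W * r + 3 * j) ++ pvTrip s (3 * W * r + 3 * j))))

theorem pv_join_nil (parts : List (List Char)) : PySem.Chars.join [] parts = parts.flatten := by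
  induction parts with
  | nil => rfl
  | cons a t ih => cases t <;> simp_all [PySem.Chars.join, List.intercalate, List.intersperse]

theorem pv_pyRepeat_two (xs : List Char) : PySem.List.pyRepeat xs 2 = xs ++ xs := by
  simp [PySem.List.pyRepeat]

theorem pv_range_mul (w b : Int) (hw : 0 < w) (hb : 0 < b) :
    PySem.List.pyRange 0 (w * b) w = (List.range b.toNat).map (fun (r : Nat) => w * (r : Int)) := by
  rw [PySem.List.pyRange_of_pos 0 (w * b) hw]
  rw [if_pos (mul_pos hw hb)]
  have h1 : w * b - 0 + w - 1 = (w - 1) + b * w := by ring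
  have h2 : (w - 1) / w = 0 := Int.ediv_eq_zero_of_lt (by omega) (by omega)
  rw [h1, Int.add_mul_ediv_right _ _ (by omega), h2]
  simp only [zero_add]

theorem pv_range_three (a w : Int) (hw : 0 < w) :
    PySem.List.pyRange a (a + 3 * w) 3 = (List.range w.toNat).map (fun (j : Nat) => a + 3 * (j : Int)) := by
  rw [PySem.List.pyRange_of_pos a (a + 3 * w) (by omega : (0:Int) < 3)]
  rw [if_pos (by omega)]
  have h1 : a + 3 * w - a + 3 - 1 = 2 + w * 3 := by ring
  have h2 : (2:Int) / 3 = 0 := by decide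
  rw [h1, Int.add_mul_ediv_right _ _ (by omega : (3:Int) ≠ 0), h2]
  simp only [zero_add]

theorem pv_take3_drop (s : List Char) (n : Nat) (h : n + 3 ≤ s.length) :
    ((s.drop n).take 3) = pvTrip s n := by
  simp only [pvTrip]
  apply List.ext_getElem
  · rw [List.length_take, List.length_drop]; simp; omega
  · intro i h1 h2
    simp only [List.length_take, List.length_drop] at h1
    rw [List.getElem_take, List.getElem_drop]
    have hi : i < 3 := by omega
    interval_cases i <;>
      simp [(by omega : n < s.length), (by omega : n + 1 < s.length),
        (by omega : n + 2 < s.length)]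

theorem pv_tripA (cs : List Char) (n : Nat) (h : n + 3 ≤ cs.length) :
    [Char.ofNat ((PySem.List.pyGetD cs ((n : Int)) ' ').toNat >>> 3),
     Char.ofNat ((PySem.List.pyGetD cs ((n : Int) + 1) ' ').toNat >>> 3),
     Char.ofNat ((PySem.List.pyGetD cs ((n : Int) + 2) ' ').toNat >>> 3)] =
      pvTrip (cs.map pvShift) n := by
  have h1 : ((n : Int) + 1) = ((n + 1 : Nat) : Int) := by push_cast; ring
  have h2 : ((n : Int) + 2) = ((n + 2 : Nat) : Int) := by push_cast; ring
  rw [h1, h2]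
  simp only [PySem.List.pyGetD_natCast]
  simp [pvTrip, pvShift, List.getElem?_eq_getElem (by omega : n < cs.length),
    List.getElem?_eq_getElem (by omega : n + 1 < cs.length),
    List.getElem?_eq_getElem (by omega : n + 2 < cs.length)]

theorem pv_A_main (w h_ : Int) (data : String) (hw : 0 < w) (hh : 0 < h_)
    (hlen : 3 * w * h_ ≤ (data.toList.length : Int)) :
    makebkgnd w h_ data =
      (w * 2, h_ * 2, String.ofList (pvCanon (data.toList.map pvShift) w.toNat h_.toNat)) := by
  have hW : ((w.toNat : Int)) = w := Int.toNat_of_nonneg hw.le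
  have hH : ((h_.toNat : Int)) = h_ := Int.toNat_of_nonneg hh.le
  have hlenN : 3 * w.toNat * h_.toNat ≤ data.toList.length := by
    have : ((3 * w.toNat * h_.toNat : Nat) : Int) ≤ (data.toList.length : Int) := by
      push_cast
      rw [hW, hH]
      exact hlen
    exact_mod_cast this
  simp only [makebkgnd]
  rw [pv_range_mul (3 * w) h_ (by omega) hh]
  simp only [fun a => pv_range_three a w hw]
  simp only [PySem.List.foldl_append_singleton_eq_map, List.nil_append, List.map_map,
    pv_join_nil, pv_pyRepeat_two]
  simp only [List.append_assoc, List.singleton_append]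
  rw [PySem.List.foldl_append_eq_flatMap]
  simp only [List.nil_append, Prod.mk.injEq, true_and]
  apply congrArg
  unfold pvCanon
  rw [pv_flatten_flatMap, List.flatMap_map]
  apply List.flatMap_congr
  intro r hr
  rw [List.mem_range] at hr
  simp only [List.flatten_cons, List.flatten_nil, List.append_nil]
  rw [← List.flatMap_def]
  congr 1 <;>
  · apply List.flatMap_congr
    intro j hj
    rw [List.mem_range] at hj
    have hb : 3 * w.toNat * r + 3 * j + 3 ≤ data.toList.length := by nlinarith
    have hx : 3 * w * (r : Int) + 3 * (j : Int) = ((3 * w.toNat * r + 3 * j : Nat) : Int) := by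
      rw [← hW]; push_cast [Int.toNat_natCast]; ring
    simp only [Function.comp, hx]
    rw [pv_tripA _ _ hb]

theorem pv_B_main (w h_ : Int) (data : String) (hd : Dom_makebkgnd w h_ data) (hw : 0 < w) (hh : 0 < h_)
    (hlen : 3 * w * h_ ≤ (data.toList.length : Int)) :
    makebkgnd_alt w h_ data =
      (w * 2, h_ * 2, String.ofList (pvCanon (data.toList.map pvShift) w.toNat h_.toNat)) := by
  have hW : ((w.toNat : Int)) = w := Int.toNat_of_nonneg hw.le
  have hH : ((h_.toNat : Int)) = h_ := Int.toNat_of_nonneg hh.le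
  have hlenN : 3 * w.toNat * h_.toNat ≤ data.toList.length := by
    have : ((3 * w.toNat * h_.toNat : Nat) : Int) ≤ (data.toList.length : Int) := by
      push_cast
      rw [hW, hH]
      exact hlen
    exact_mod_cast this
  have hch : ∀ c ∈ data.toList, c.toNat < 256 := by
    unfold Dom_makebkgnd pvDomStr pvDomChar pvDomInt at hd
    simp only [Bool.and_eq_true, List.all_eq_true] at hd
    intro c hc
    have := hd.2 c hc
    simp only [Bool.or_eq_true, Bool.and_eq_true, decide_eq_true_eq, beq_iff_eq] at this
    omega
  simp only [makebkgnd_alt]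
  have hs : data.toList.map
      (fun c => PySem.List.pyGetD ((List.range 256).map (fun i => [Char.ofNat (i >>> 3)]))
        ((c.toNat : Int)) []) = data.toList.map (fun c => [pvShift c]) := by
    apply List.map_congr_left
    intro c hc
    rw [PySem.List.pyGetD_natCast]
    rw [List.getD_eq_getElem _ _ (by simpa using hch c hc)]
    simp [pvShift]
  rw [hs]
  simp only [pv_join_nil]
  have hflat : (data.toList.map (fun c => [pvShift c])).flatten = data.toList.map pvShift := by
    induction data.toList with
    | nil => rfl
    | cons a t ih => simp_all
  simp only [hflat]
  have hsl : (data.toList.map pvShift).length = data.toList.length := List.length_map _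
  rw [PySem.List.pyRange_one]
  simp only [sub_zero, zero_add]
  have hinner : PySem.List.pyRange 0 (3 * w) 3 =
      (List.range w.toNat).map (fun (j : Nat) => (0 : Int) + 3 * (j : Int)) := by
    have := pv_range_three 0 w hw
    simpa using this
  simp only [hinner, zero_add, List.map_map]
  simp only [pv_pyRepeat_two]
  simp only [List.append_assoc, List.singleton_append]
  rw [PySem.List.foldl_append_eq_flatMap]
  simp only [List.nil_append, Prod.mk.injEq, true_and]
  apply congrArg
  unfold pvCanon
  rw [pv_flatten_flatMap, List.flatMap_map]
  apply List.flatMap_congr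
  intro r hr
  rw [List.mem_range] at hr
  simp only [List.flatten_cons, List.flatten_nil, List.append_nil]
  have e1 : ((r : Int)) * (3 * w) = ((3 * w.toNat * r : Nat) : Int) := by
    rw [← hW]; push_cast [Int.toNat_natCast]; ring
  have e2 : ((r : Int) + 1) * (3 * w) = ((3 * w.toNat * r + 3 * w.toNat : Nat) : Int) := by
    rw [← hW]; push_cast [Int.toNat_natCast]; ring
  rw [e1, e2, PySem.List.slice_natCast]
  simp only [Nat.add_sub_cancel_left]
  rw [← List.flatMap_def]
  congr 1 <;>
  · apply List.flatMap_congr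
    intro j hj
    rw [List.mem_range] at hj
    have e3 : (3 : Int) * (j : Int) = ((3 * j : Nat) : Int) := by push_cast; ring
    have e4 : ((3 * j : Nat) : Int) + 3 = ((3 * j + 3 : Nat) : Int) := by push_cast; ring
    simp only [Function.comp_apply]
    rw [e3, e4, PySem.List.slice_natCast]
    simp only [Nat.add_sub_cancel_left]
    rw [List.drop_take, List.take_take]
    have hmin : min 3 (3 * w.toNat - 3 * j) = 3 := by omega
    rw [hmin, List.drop_drop]
    rw [pv_take3_drop _ _ (by rw [hsl]; nlinarith)]

theorem pv_A_degen (w h_ : Int) (data : String) (hd : w < 0 ∨ (0 < w ∧ h_ ≤ 0)) :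
    makebkgnd w h_ data = (w * 2, h_ * 2, String.ofList []) := by
  simp only [makebkgnd]
  rcases hd with hw | ⟨hw, hh⟩
  · have hinner : ∀ p : Int, PySem.List.pyRange p (p + 3 * w) 3 = [] := by
      intro p
      rw [PySem.List.pyRange_of_pos _ _ (by omega : (0:Int) < 3), if_neg (by omega)]
      rfl
    simp only [hinner, List.foldl_nil, pv_join_nil, List.flatten_nil]
    simp only [List.append_assoc, List.singleton_append]
    rw [PySem.List.foldl_append_eq_flatMap (g := fun _ => ([[], []] : List (List Char)))]
    simp [List.flatten_eq_nil_iff]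
  · have houter : PySem.List.pyRange 0 (3 * w * h_) (3 * w) = [] := by
      rw [PySem.List.pyRange_of_pos _ _ (by omega : (0:Int) < 3 * w), if_neg (by nlinarith)]
      rfl
    rw [houter]
    simp [pv_join_nil]

theorem pv_B_degen (w h_ : Int) (data : String) (hd : w < 0 ∨ (0 < w ∧ h_ ≤ 0)) :
    makebkgnd_alt w h_ data = (w * 2, h_ * 2, String.ofList []) := by
  simp only [makebkgnd_alt]
  rcases hd with hw | ⟨hw, hh⟩
  · have hinner : PySem.List.pyRange 0 (3 * w) 3 = [] := by
      rw [PySem.List.pyRange_of_pos _ _ (by omega : (0:Int) < 3), if_neg (by omega)]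
      rfl
    simp only [hinner, List.map_nil, pv_join_nil, List.flatten_nil]
    simp only [List.append_assoc, List.singleton_append]
    rw [PySem.List.foldl_append_eq_flatMap (g := fun _ => ([[], []] : List (List Char)))]
    simp [List.flatten_eq_nil_iff]
  · have hrows : PySem.List.pyRange 0 h_ 1 = [] := PySem.List.pyRange_one_eq_nil (by omega)
    rw [hrows]
    simp [pv_join_nil]

-- ===== VERDICT (by name: the statement is the Claim_ definition above) =====
theorem makebkgnd_spec : Claim_equal_makebkgnd := by
  intro w h_ data hdom hpre
  unfold Spec_makebkgnd
  obtain ⟨hw0, hlen⟩ := hpre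
  rcases lt_trichotomy w 0 with hw | hw | hw
  · rw [pv_A_degen w h_ data (Or.inl hw), pv_B_degen w h_ data (Or.inl hw)]
  · exact absurd hw hw0
  · rcases le_or_gt h_ 0 with hh | hh
    · rw [pv_A_degen w h_ data (Or.inr ⟨hw, hh⟩), pv_B_degen w h_ data (Or.inr ⟨hw, hh⟩)]
    · have hl := hlen hw hh
      rw [PySem.Str.len_eq] at hl
      rw [pv_A_main w h_ data hw hh hl, pv_B_main w h_ data hdom hw hh hl]
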